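-- pv_equiv track=rewrite | github.com/itka0526/leeeeet-code | problems-in-cpp/script.py | calculate_max_tips
-- ===== SOURCE A (Python) =====
-- def calculate_max_tips(schedules: list):
--     schedules = sorted(schedules, key=lambda x: (x[1], x[0]))
--     current_time = 0
--     total_tips = 0
--
--     for a, b in schedules:
--         delivery_time = current_time + b
--         total_tips += a - delivery_time
--         current_time = delivery_time
--
--     return total_tips
-- ===== SOURCE B (Python) =====
-- def calculate_max_tips(schedules: list):
--     schedules = sorted(schedules, key=lambda x: (x[1], x[0]))
--     n = len(schedules)
--     return sum(a for a, b in schedules) - sum((n - i) * b for i, (a, b) in enumerate(schedules))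
-- ===== Notes on version B (the rewrite author's own statement) =====
-- stated objective: alternative
-- what changed: Replaces A's single stateful loop threading current_time and total_tips with a stateless two-pass decomposition: sum of tips minus the closed-form weighted sum of delivery times, sum((n - i) * b) over the sorted list.
import Mathlib
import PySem

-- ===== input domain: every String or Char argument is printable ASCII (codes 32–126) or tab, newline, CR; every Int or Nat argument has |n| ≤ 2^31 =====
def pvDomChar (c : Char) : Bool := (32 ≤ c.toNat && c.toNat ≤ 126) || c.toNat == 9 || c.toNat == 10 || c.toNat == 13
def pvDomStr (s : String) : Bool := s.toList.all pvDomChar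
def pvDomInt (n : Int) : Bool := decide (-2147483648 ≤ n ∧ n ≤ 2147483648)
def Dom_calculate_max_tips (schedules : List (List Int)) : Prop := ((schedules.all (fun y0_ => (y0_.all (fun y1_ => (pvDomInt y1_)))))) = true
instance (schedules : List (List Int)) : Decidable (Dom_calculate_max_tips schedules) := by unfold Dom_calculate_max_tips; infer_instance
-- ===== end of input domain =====

-- B replaces A's stateful loop by a stateless two-pass decomposition (sum of tips minus a closed-form
-- weighted sum of delivery durations); equivalence of the return values is proved on Pre_.

-- ===== PORT A =====
-- Under Pre_ (every inner list has length 2), `x[0]`/`x[1]` and the `for a, b in …` unpacking are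
-- exactly `x.getD 0 0` / `x.getD 1 0`; outside Pre_ Python raises, so nothing is claimed there.
def calculate_max_tips (schedules : List (List Int)) : Int :=
  let s := PySem.List.sorted2 schedules (fun x => x.getD 1 0) (fun x => x.getD 0 0) false
  (s.foldl (fun (st : Int × Int) x =>
      let delivery_time := st.1 + x.getD 1 0
      (delivery_time, st.2 + x.getD 0 0 - delivery_time)) (0, 0)).2

-- ===== PORT B =====
def calculate_max_tips_alt (schedules : List (List Int)) : Int :=
  let s := PySem.List.sorted2 schedules (fun x => x.getD 1 0) (fun x => x.getD 0 0) false
  let n : Int := s.length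
  (s.map (fun x => x.getD 0 0)).sum
    - ((PySem.List.enumerate s).map (fun p => (n - p.1) * p.2.getD 1 0)).sum

-- ===== PRECONDITION & SPEC =====
-- Pre_ excludes inner lists whose length is not 2: there Python A raises (IndexError/ValueError).
def Pre_calculate_max_tips (schedules : List (List Int)) : Prop :=
  ∀ x ∈ schedules, x.length = 2
instance (schedules : List (List Int)) : Decidable (Pre_calculate_max_tips schedules) := by
  unfold Pre_calculate_max_tips; infer_instance
def pvWitness_calculate_max_tips : List (List Int) := [[4, 1], [2, 3], [5, 1]]

def Spec_calculate_max_tips (schedules : List (List Int)) (out : Int) : Prop := out = calculate_max_tips_alt schedules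
instance (schedules : List (List Int)) (out : Int) : Decidable (Spec_calculate_max_tips schedules out) := by unfold Spec_calculate_max_tips; infer_instance

-- ===== CLAIM (what is proved, stated in full; the proofs are below) =====
def Claim_equal_calculate_max_tips : Prop := ∀ (schedules : List (List Int)), Dom_calculate_max_tips schedules → Pre_calculate_max_tips schedules → Spec_calculate_max_tips schedules (calculate_max_tips schedules)

-- ===== LEMMAS AND PROOFS =====

-- shifting the enumerate start by one while raising the weight base by one leaves the sum unchanged
theorem pv_enum_shift (xs : List (List Int)) : ∀ (s c : Int),
    ((PySem.List.enumerate xs s).map (fun p => (c - p.1) * p.2.getD 1 0)).sum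
      = ((PySem.List.enumerate xs (s + 1)).map (fun p => (c + 1 - p.1) * p.2.getD 1 0)).sum := by
  induction xs with
  | nil => intro s c; simp [PySem.List.enumerate_nil]
  | cons x xs ih =>
    intro s c
    simp only [PySem.List.enumerate_cons, List.map_cons, List.sum_cons, ih (s + 1) c]
    ring_nf

theorem pv_weight_cons (x : List Int) (xs : List (List Int)) :
    ((PySem.List.enumerate (x :: xs) 0).map
        (fun p => (((x :: xs).length : Int) - p.1) * p.2.getD 1 0)).sum
      = ((xs.length : Int) + 1) * x.getD 1 0
        + ((PySem.List.enumerate xs 0).map (fun p => ((xs.length : Int) - p.1) * p.2.getD 1 0)).sum := by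
  rw [PySem.List.enumerate_cons, List.map_cons, List.sum_cons, pv_enum_shift xs 0 (xs.length : Int)]
  have hmap : (List.map (fun (p : Int × List Int) => (((x :: xs).length : Int) - p.1) * p.2.getD 1 0)
        (PySem.List.enumerate xs (0 + 1)))
      = List.map (fun p => ((xs.length : Int) + 1 - p.1) * p.2.getD 1 0)
        (PySem.List.enumerate xs (0 + 1)) := by
    apply List.map_congr_left
    intro p _
    simp only [List.length_cons]
    push_cast
    ring
  rw [hmap]
  simp only [List.length_cons]
  push_cast
  ring

-- the invariant of A's loop: its running total is tips-so-far minus length-weighted delivery times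
theorem pv_fold_closed (l : List (List Int)) : ∀ (ct tt : Int),
    (l.foldl (fun (st : Int × Int) x =>
        let delivery_time := st.1 + x.getD 1 0
        (delivery_time, st.2 + x.getD 0 0 - delivery_time)) (ct, tt)).2
      = tt + (l.map (fun x => x.getD 0 0)).sum - (l.length : Int) * ct
        - ((PySem.List.enumerate l 0).map (fun p => ((l.length : Int) - p.1) * p.2.getD 1 0)).sum := by
  induction l with
  | nil => intro ct tt; simp [PySem.List.enumerate_nil]
  | cons x xs ih =>
    intro ct tt
    rw [List.foldl_cons, pv_weight_cons]
    simp only [ih, List.map_cons, List.sum_cons, List.length_cons]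
    push_cast
    ring

-- ===== VERDICT (by name: the statement is the Claim_ definition above) =====
theorem calculate_max_tips_spec : Claim_equal_calculate_max_tips := by
  intro schedules _ _
  unfold Spec_calculate_max_tips calculate_max_tips calculate_max_tips_alt
  simp only [pv_fold_closed]
  ring
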